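-- pv_equiv track=rewrite | github.com/VitalyTance/MyHomeworkAndFirstExperienceInProgramming | xor_cyphering.py | xor_cyphering
-- ===== SOURCE A (Python) =====
-- def xor_cyphering(word_to_cyph, key_to_cyph):
--     cyphered_word = ''
--     word_to_cyph = list(word_to_cyph)
--     key_to_cyph = list(key_to_cyph)
--     for i in range(0, len(word_to_cyph), 1):
--         word_to_cyph[i] = ord(word_to_cyph[i])
--         for j in range(0, len(key_to_cyph), 1):
--             word_to_cyph[i] = word_to_cyph[i] ^ ord(key_to_cyph[j])
--         word_to_cyph[i] = chr(word_to_cyph[i])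
--         cyphered_word += word_to_cyph[i]
--     return cyphered_word
-- ===== SOURCE B (Python) =====
-- def xor_cyphering(word_to_cyph, key_to_cyph):
--     key_fold = 0
--     for k in key_to_cyph:
--         key_fold ^= ord(k)
--     return ''.join(chr(ord(c) ^ key_fold) for c in word_to_cyph)
-- ===== Notes on version B (the rewrite author's own statement) =====
-- stated objective: faster
-- what changed: XOR-fold the key once into a single integer, then XOR each word character with that constant, instead of re-scanning the whole key for every word character.
import Mathlib
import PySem

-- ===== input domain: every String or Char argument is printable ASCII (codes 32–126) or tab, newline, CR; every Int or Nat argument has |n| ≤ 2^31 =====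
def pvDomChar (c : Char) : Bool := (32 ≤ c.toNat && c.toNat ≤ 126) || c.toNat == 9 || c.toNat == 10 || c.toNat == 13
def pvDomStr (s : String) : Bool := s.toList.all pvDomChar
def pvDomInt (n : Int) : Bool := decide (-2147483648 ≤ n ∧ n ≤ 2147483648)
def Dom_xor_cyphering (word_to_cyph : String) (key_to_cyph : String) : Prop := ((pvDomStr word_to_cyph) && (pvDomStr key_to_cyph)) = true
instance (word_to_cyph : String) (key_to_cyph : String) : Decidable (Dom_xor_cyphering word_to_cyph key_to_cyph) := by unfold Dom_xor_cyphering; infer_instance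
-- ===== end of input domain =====

-- B XOR-folds the key once and XORs each word char with that constant (O(n+m) vs A's O(n*m), asymptotically faster).

-- ===== PORT A =====
-- A: for each word char, fold XOR of EVERY key char onto it, append the chr to the accumulator string.
def xor_cyphering (word_to_cyph : String) (key_to_cyph : String) : String :=
  String.mk (word_to_cyph.toList.foldl
    (fun cyphered c =>
      cyphered ++ [Char.ofNat (key_to_cyph.toList.foldl (fun v kc => v ^^^ kc.toNat) c.toNat)])
    [])

-- ===== PORT B =====
-- B: fold the key into one value first, then map over the word once.
def xor_cyphering_alt (word_to_cyph : String) (key_to_cyph : String) : String :=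
  let key_fold := key_to_cyph.toList.foldl (fun v kc => v ^^^ kc.toNat) 0
  String.mk (word_to_cyph.toList.map (fun c => Char.ofNat (c.toNat ^^^ key_fold)))

-- ===== PRECONDITION & SPEC =====
def Spec_xor_cyphering (word_to_cyph : String) (key_to_cyph : String) (out : String) : Prop := out = xor_cyphering_alt word_to_cyph key_to_cyph
instance (word_to_cyph : String) (key_to_cyph : String) (out : String) : Decidable (Spec_xor_cyphering word_to_cyph key_to_cyph out) := by unfold Spec_xor_cyphering; infer_instance

-- ===== CLAIM (what is proved, stated in full; the proofs are below) =====
def Claim_equal_xor_cyphering : Prop := ∀ (word_to_cyph : String) (key_to_cyph : String), Dom_xor_cyphering word_to_cyph key_to_cyph → Spec_xor_cyphering word_to_cyph key_to_cyph (xor_cyphering word_to_cyph key_to_cyph)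

-- ===== LEMMAS AND PROOFS =====

-- Folding XOR starting from a equals a XOR (the fold starting from 0).
theorem xor_foldl_init (l : List Char) (a : Nat) :
    l.foldl (fun v kc => v ^^^ kc.toNat) a = a ^^^ l.foldl (fun v kc => v ^^^ kc.toNat) 0 := by
  induction l generalizing a with
  | nil => simp
  | cons k t ih =>
    simp only [List.foldl_cons]
    rw [ih (a ^^^ k.toNat), ih (0 ^^^ k.toNat), Nat.zero_xor, Nat.xor_assoc]

-- The append-accumulator fold equals acc ++ map.
theorem foldl_append_map (f : Char → Char) (l : List Char) (acc : List Char) :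
    l.foldl (fun cy c => cy ++ [f c]) acc = acc ++ l.map f := by
  induction l generalizing acc with
  | nil => simp
  | cons c t ih => simp [ih]

-- ===== VERDICT (by name: the statement is the Claim_ definition above) =====
theorem xor_cyphering_spec : Claim_equal_xor_cyphering := by
  intro w k _
  unfold Spec_xor_cyphering xor_cyphering xor_cyphering_alt
  rw [foldl_append_map]
  simp only [List.nil_append]
  congr 1
  apply List.map_congr_left
  intro c _
  rw [xor_foldl_init]
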